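-- pv_equiv track=rewrite | github.com/KPSentinelAG/password-strength-checker | password_checker.py | consecutive_check
-- ===== SOURCE A (Python) =====
-- def consecutive_check(password):
--     # Convert the password to lowercase for easier comparison
--     password_lowercase = password.lower()
--
--     # Iterate through the password to check groups of three characters
--     for i in range(len(password_lowercase) - 2):
--         char1 = password_lowercase[i]
--         char2 = password_lowercase[i + 1]
--         char3 = password_lowercase[i + 2]
--
--         # Check if all three characters are letters
--         if char1.isalpha() and char2.isalpha() and char3.isalpha():
--             char1_ascii = ord(char1)
--             char2_ascii = ord(char2)
--             char3_ascii = ord(char3)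
--
--             # Check to see if they are consecutive letters in ascending order
--             if char2_ascii == char1_ascii + 1 and char3_ascii == char2_ascii + 1:
--                 return True
--
--             # Check to see if they are consecutive letters in descending order
--             if char3_ascii == char2_ascii - 1 and char2_ascii == char1_ascii - 1:
--                 return True
--
--         # Check if all three characters are numbers
--         elif char1.isdigit() and char2.isdigit() and char3.isdigit():
--             num1_ascii = ord(char1)
--             num2_ascii = ord(char2)
--             num3_ascii = ord(char3)
--
--             # Check if the numbers are consecutive in ascending order
--             if num2_ascii == num1_ascii + 1 and num3_ascii == num2_ascii + 1:
--                 return True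
--
--             # Check if the numbers are consecutive in descending order
--             if num3_ascii == num2_ascii - 1 and num2_ascii == num1_ascii - 1:
--                 return True
--
--     return False
-- ===== SOURCE B (Python) =====
-- def consecutive_check(password):
--     s = password.lower()
--     if not s:
--         return False
--     prev = s[0]
--     asc_run = desc_run = 1
--     for b in s[1:]:
--         same_cat = (prev.isdigit() and b.isdigit()) or (prev.isalpha() and b.isalpha())
--         asc_run = asc_run + 1 if same_cat and ord(b) == ord(prev) + 1 else 1
--         desc_run = desc_run + 1 if same_cat and ord(b) == ord(prev) - 1 else 1
--         if asc_run >= 3 or desc_run >= 3: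
--             return True
--         prev = b
--     return False
-- ===== Notes on version B (the rewrite author's own statement) =====
-- stated objective: alternative
-- what changed: Replaces the three-character sliding-window scan (re-examining each character up to three times with per-window category tests) by a single forward pass over adjacent pairs that maintains two run-length counters (ascending and descending) and fires as soon as a run reaches 3.
import Mathlib
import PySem

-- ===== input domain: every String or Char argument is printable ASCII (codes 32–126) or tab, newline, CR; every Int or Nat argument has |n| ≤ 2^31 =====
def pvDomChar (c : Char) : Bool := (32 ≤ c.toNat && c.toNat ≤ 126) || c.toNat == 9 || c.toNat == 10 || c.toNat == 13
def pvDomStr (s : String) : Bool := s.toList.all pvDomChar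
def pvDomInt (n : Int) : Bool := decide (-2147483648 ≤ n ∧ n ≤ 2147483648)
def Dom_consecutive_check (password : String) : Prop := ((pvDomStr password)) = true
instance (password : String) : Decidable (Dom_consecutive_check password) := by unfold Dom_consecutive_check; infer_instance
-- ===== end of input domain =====

-- B replaces A's three-character sliding-window scan by a single forward pass over
-- adjacent pairs maintaining ascending/descending run counters (alternative decomposition, same cost).


-- ===== PORT A =====
-- one window of A's loop body: chars at i, i+1, i+2; nested alpha/digit branches as in A
def pvCheckWin (s : List Char) (i : Int) : Bool :=
  match PySem.List.pyGet? s i, PySem.List.pyGet? s (i + 1), PySem.List.pyGet? s (i + 2) with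
  | some c1, some c2, some c3 =>
    if PySem.Chars.isalpha c1 && PySem.Chars.isalpha c2 && PySem.Chars.isalpha c3 then
      (((c2.toNat : Int) == (c1.toNat : Int) + 1 && (c3.toNat : Int) == (c2.toNat : Int) + 1) ||
       ((c3.toNat : Int) == (c2.toNat : Int) - 1 && (c2.toNat : Int) == (c1.toNat : Int) - 1))
    else if PySem.Chars.isdigit c1 && PySem.Chars.isdigit c2 && PySem.Chars.isdigit c3 then
      (((c2.toNat : Int) == (c1.toNat : Int) + 1 && (c3.toNat : Int) == (c2.toNat : Int) + 1) ||
       ((c3.toNat : Int) == (c2.toNat : Int) - 1 && (c2.toNat : Int) == (c1.toNat : Int) - 1))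
    else false
  | _, _, _ => false

-- A's 'for i in range(len - 2)' with early return
def pvALoop (s : List Char) : List Int → Bool
  | [] => false
  | i :: rest => if pvCheckWin s i then true else pvALoop s rest

def consecutive_check (password : String) : Bool :=
  let s := (PySem.Str.lower password).toList
  pvALoop s (PySem.List.pyRange 0 ((s.length : Int) - 2) 1)

-- ===== PORT B =====
def pvSameCat (a b : Char) : Bool :=
  (PySem.Chars.isdigit a && PySem.Chars.isdigit b) ||
  (PySem.Chars.isalpha a && PySem.Chars.isalpha b)

-- B's loop: prev char, ascending and descending run lengths
def pvBLoop : List Char → Char → Int → Int → Bool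
  | [], _, _, _ => false
  | b :: rest, prev, ascRun, descRun =>
    let asc' := if pvSameCat prev b && (b.toNat : Int) == (prev.toNat : Int) + 1 then ascRun + 1 else 1
    let desc' := if pvSameCat prev b && (b.toNat : Int) == (prev.toNat : Int) - 1 then descRun + 1 else 1
    if asc' ≥ 3 || desc' ≥ 3 then true else pvBLoop rest b asc' desc'

def consecutive_check_alt (password : String) : Bool :=
  match (PySem.Str.lower password).toList with
  | [] => false
  | a :: rest => pvBLoop rest a 1 1

-- ===== PRECONDITION & SPEC =====
def Spec_consecutive_check (password : String) (out : Bool) : Prop := out = consecutive_check_alt password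
instance (password : String) (out : Bool) : Decidable (Spec_consecutive_check password out) := by unfold Spec_consecutive_check; infer_instance

-- ===== CLAIM (what is proved, stated in full; the proofs are below) =====
def Claim_equal_consecutive_check : Prop := ∀ (password : String), Dom_consecutive_check password → Spec_consecutive_check password (consecutive_check password)

-- ===== LEMMAS AND PROOFS =====

-- common specification: some window of three has an ascending or descending same-category run
def pvAsc (a b : Char) : Bool := pvSameCat a b && (b.toNat : Int) == (a.toNat : Int) + 1
def pvDesc (a b : Char) : Bool := pvSameCat a b && (b.toNat : Int) == (a.toNat : Int) - 1

def pvTriple : List Char → Bool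
  | a :: b :: c :: t => (pvAsc a b && pvAsc b c) || (pvDesc a b && pvDesc b c) || pvTriple (b :: c :: t)
  | _ => false

theorem pv_not_digit_and_alpha (c : Char) :
    ¬ (PySem.Chars.isdigit c = true ∧ PySem.Chars.isalpha c = true) := by
  simp only [PySem.Chars.isdigit, PySem.Chars.isalpha, PySem.Chars.isupper, PySem.Chars.islower,
        Char.le_def, Bool.and_eq_true, Bool.or_eq_true, decide_eq_true_eq]
  rintro ⟨⟨h1, h2⟩, h3 | h3⟩ <;>
    · obtain ⟨h4, h5⟩ := h3; revert h1 h2 h4 h5; simp [UInt32.le_iff_toNat_le]; omega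

-- A's window check equals the pairwise spec
theorem pv_win_eq (a b c : Char) (t : List Char) :
    pvCheckWin (a :: b :: c :: t) 0 =
      ((pvAsc a b && pvAsc b c) || (pvDesc a b && pvDesc b c)) := by
  have g1 : PySem.List.pyGet? (a :: b :: c :: t) 0 = some a := by
    simp [PySem.List.pyGet?, PySem.List.pyIdx?]; rw [if_pos (by omega)]; simp
  have g2 : PySem.List.pyGet? (a :: b :: c :: t) (0+1) = some b := by
    simp [PySem.List.pyGet?, PySem.List.pyIdx?]; rw [if_pos (by omega)]; simp
  have g3 : PySem.List.pyGet? (a :: b :: c :: t) (0+2) = some c := by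
    simp [PySem.List.pyGet?, PySem.List.pyIdx?]; rw [if_pos (by omega)]; simp
  have h1 := pv_not_digit_and_alpha a
  have h2 := pv_not_digit_and_alpha b
  have h3 := pv_not_digit_and_alpha c
  rw [pvCheckWin, g1, g2, g3]
  simp only [pvAsc, pvDesc, pvSameCat]
  rcases hda : PySem.Chars.isdigit a <;> rcases haa : PySem.Chars.isalpha a <;>
  rcases hdb : PySem.Chars.isdigit b <;> rcases hab : PySem.Chars.isalpha b <;>
  rcases hdc : PySem.Chars.isdigit c <;> rcases hac : PySem.Chars.isalpha c <;>
    simp_all [Bool.and_comm]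

-- shifting the window start past a dropped head character
theorem pv_win_shift (s : List Char) (a : Char) (i : Int) (h : 0 ≤ i) :
    pvCheckWin (a :: s) (i + 1) = pvCheckWin s i := by
  obtain ⟨n, rfl⟩ : ∃ n : ℕ, i = (n : ℤ) := ⟨i.toNat, (Int.toNat_of_nonneg h).symm⟩
  have e1 : (n : ℤ) + 1 + 1 = ((n + 1 : ℕ) : ℤ) + 1 := by push_cast; ring
  have e2 : (n : ℤ) + 1 + 2 = ((n + 2 : ℕ) : ℤ) + 1 := by push_cast; ring
  rw [pvCheckWin, pvCheckWin, e1, e2, PySem.List.pyGet?_cons_succ, PySem.List.pyGet?_cons_succ,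
      PySem.List.pyGet?_cons_succ]
  norm_cast

theorem pv_aloop_shift (a : Char) (s : List Char) (l : List Int) (h : ∀ i ∈ l, 0 ≤ i) :
    pvALoop (a :: s) (l.map (· + 1)) = pvALoop s l := by
  induction l with
  | nil => rfl
  | cons i rest ih =>
    simp only [List.map_cons, pvALoop]
    rw [pv_win_shift s a i (h i (by simp)), ih (fun j hj => h j (by simp [hj]))]

theorem pv_a_eq_triple (s : List Char) :
    pvALoop s (PySem.List.pyRange 0 ((s.length : Int) - 2) 1) = pvTriple s := by
  induction s with
  | nil => simp [PySem.List.pyRange_one_eq_nil (by simp : ((List.length ([] : List Char) : Int) - 2) ≤ 0), pvALoop, pvTriple]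
  | cons a t ih =>
    match t with
    | [] =>
      simp [PySem.List.pyRange_one_eq_nil (by simp : (([a] : List Char).length : Int) - 2 ≤ 0), pvALoop, pvTriple]
    | [b] =>
      simp [PySem.List.pyRange_one_eq_nil (by simp : (([a, b] : List Char).length : Int) - 2 ≤ 0), pvALoop, pvTriple]
    | b :: c :: t' =>
      have hm : (0 : ℤ) < ((a :: b :: c :: t').length : ℤ) - 2 := by simp; omega
      rw [PySem.List.pyRange_one_cons hm, pvALoop]
      have hshift : PySem.List.pyRange (0 + 1) (((a :: b :: c :: t').length : ℤ) - 2) 1 =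
          (PySem.List.pyRange 0 (((b :: c :: t').length : ℤ) - 2) 1).map (· + 1) := by
        rw [PySem.List.pyRange_one, PySem.List.pyRange_one, List.map_map]
        have : ((a :: b :: c :: t').length : ℤ) - 2 - (0 + 1) = ((b :: c :: t').length : ℤ) - 2 - 0 := by
          simp; omega
        rw [this]
        apply List.map_congr_left
        intro k _
        simp [add_comm]
      rw [hshift, pv_aloop_shift a (b :: c :: t') _
        (by intro j hj; have := (PySem.List.mem_pyRange_one).1 hj; omega), ih, pv_win_eq]
      rw [pvTriple]
      rcases pvAsc a b && pvAsc b c || (pvDesc a b && pvDesc b c) with _ | _ <;> simp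

-- B's loop characterised by the pairwise spec plus its run-counter state
def pvHeadAsc (a : Char) : List Char → Bool
  | [] => false
  | b :: _ => pvAsc a b

def pvHeadDesc (a : Char) : List Char → Bool
  | [] => false
  | b :: _ => pvDesc a b

theorem pv_b_char (t : List Char) : ∀ (a : Char) (ascRun descRun : Int),
    (ascRun = 1 ∨ ascRun = 2) → (descRun = 1 ∨ descRun = 2) →
    pvBLoop t a ascRun descRun =
      ((ascRun == 2 && pvHeadAsc a t) || (descRun == 2 && pvHeadDesc a t) || pvTriple (a :: t)) := by
  induction t with
  | nil => intro a ascRun descRun _ _; simp [pvBLoop, pvHeadAsc, pvHeadDesc, pvTriple]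
  | cons b t' ih =>
    intro a ascRun descRun hA hD
    have ea : (pvSameCat a b && ((b.toNat : Int) == (a.toNat : Int) + 1)) = pvAsc a b := rfl
    have ed : (pvSameCat a b && ((b.toNat : Int) == (a.toNat : Int) - 1)) = pvDesc a b := rfl
    rw [pvBLoop]
    simp only [ea, ed, pvHeadAsc]
    match t' with
    | [] =>
      rcases hab : pvAsc a b <;> rcases hdb : pvDesc a b <;>
        rcases hA with rfl | rfl <;> rcases hD with rfl | rfl <;>
          simp_all [pvBLoop, pvHeadAsc, pvHeadDesc, pvTriple] <;> omega
    | c :: t'' =>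
      rcases hab : pvAsc a b <;> rcases hdb : pvDesc a b <;>
        rcases hA with rfl | rfl <;> rcases hD with rfl | rfl <;>
          simp only [hab, hdb, Bool.and_true, Bool.and_false, if_true, if_false] <;>
            rw [show pvTriple (a :: b :: c :: t'') =
              ((pvAsc a b && pvAsc b c) || (pvDesc a b && pvDesc b c) || pvTriple (b :: c :: t'')) from rfl] <;>
            split_ifs <;> first
              | (simp_all [pvHeadAsc, pvHeadDesc]; try omega)
              | (rw [ih b _ _ (by omega) (by omega)]; simp_all [pvHeadAsc, pvHeadDesc]; try omega)

-- ===== VERDICT (by name: the statement is the Claim_ definition above) =====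
theorem consecutive_check_spec : Claim_equal_consecutive_check := by
  intro password _
  unfold Spec_consecutive_check consecutive_check consecutive_check_alt
  rw [pv_a_eq_triple]
  cases h : (PySem.Str.lower password).toList with
  | nil => simp [pvTriple]
  | cons a rest =>
    show pvTriple (a :: rest) = pvBLoop rest a 1 1
    rw [pv_b_char rest a 1 1 (Or.inl rfl) (Or.inl rfl)]
    simp
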